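-- pv_equiv track=rewrite | github.com/serban-hartular/SuffixesPhonChanges | entry2txt.py | move_stress
-- ===== SOURCE A (Python) =====
-- def move_stress(word : str, new_stress_index: int) -> str:
--     sylls = word.split('-')
--     if len(sylls) == 1:
--         return word
--     if new_stress_index < 0 or new_stress_index >= len(sylls):
--         return None
--     sylls = [('"' if i == new_stress_index else '')  + syl.replace('"', '')
--              for i, syl in enumerate(sylls)]
--     return '-'.join(sylls)
-- ===== SOURCE B (Python) =====
-- def move_stress(word: str, new_stress_index: int) -> str:
--     # single pass over the flat string instead of split/replace/join
--     n = word.count('-') + 1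
--     if n == 1:
--         return word
--     if new_stress_index < 0 or new_stress_index >= n:
--         return None
--     out = ['"'] if new_stress_index == 0 else []
--     j = 0
--     for c in word:
--         if c == '"':
--             continue
--         out.append(c)
--         if c == '-':
--             j += 1
--             if j == new_stress_index:
--                 out.append('"')
--     return ''.join(out)
-- ===== Notes on version B (the rewrite author's own statement) =====
-- stated objective: alternative
-- what changed: B replaces A's split-on-'-' / per-syllable quote-strip / rejoin pipeline by one flat pass over the string that drops quotes and splices the single stress marker in at the target syllable boundary, guarded by a dash count.
import Mathlib
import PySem

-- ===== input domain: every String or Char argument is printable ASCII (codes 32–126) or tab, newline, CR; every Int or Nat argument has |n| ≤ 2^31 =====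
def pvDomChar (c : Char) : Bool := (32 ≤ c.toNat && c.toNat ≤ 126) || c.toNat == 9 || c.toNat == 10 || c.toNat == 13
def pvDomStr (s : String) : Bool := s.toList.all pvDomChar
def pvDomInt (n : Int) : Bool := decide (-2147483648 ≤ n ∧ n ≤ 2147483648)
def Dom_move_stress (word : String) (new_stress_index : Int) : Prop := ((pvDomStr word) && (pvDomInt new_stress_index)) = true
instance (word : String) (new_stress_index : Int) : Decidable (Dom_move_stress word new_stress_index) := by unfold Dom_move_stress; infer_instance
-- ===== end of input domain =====

-- B does the same job in one flat pass (count dashes, strip quotes, splice the marker in) instead of A's split/map/join; same cost, different decomposition.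

-- ===== PORT A =====
def move_stress (word : String) (new_stress_index : Int) : Option String :=
  let sylls := PySem.Chars.splitOn word.toList ['-']
  if sylls.length == 1 then some word
  else if new_stress_index < 0 || (sylls.length : Int) ≤ new_stress_index then none
  else some (String.ofList (PySem.Chars.join ['-']
    ((PySem.List.enumerate sylls).map (fun p =>
      (if p.1 == new_stress_index then ['"'] else []) ++ PySem.Chars.replace p.2 ['"'] []))))

-- ===== PORT B =====
def move_stress_alt (word : String) (new_stress_index : Int) : Option String :=
  let n : Int := (PySem.Str.count word "-" : Int) + 1
  if n == 1 then some word
  else if new_stress_index < 0 || n ≤ new_stress_index then none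
  else
    let init : List Char := if new_stress_index == 0 then ['"'] else []
    let st := word.toList.foldl (fun (st : List Char × Int) c =>
      if c == '"' then st
      else
        let out := st.1 ++ [c]
        if c == '-' then
          let j := st.2 + 1
          (if j == new_stress_index then out ++ ['"'] else out, j)
        else (out, st.2)) (init, (0 : Int))
    some (String.ofList st.1)

-- ===== PRECONDITION & SPEC =====
def Spec_move_stress (word : String) (new_stress_index : Int) (out : Option String) : Prop := out = move_stress_alt word new_stress_index
instance (word : String) (new_stress_index : Int) (out : Option String) : Decidable (Spec_move_stress word new_stress_index out) := by unfold Spec_move_stress; infer_instance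

-- ===== CLAIM (what is proved, stated in full; the proofs are below) =====
def Claim_equal_move_stress : Prop := ∀ (word : String) (new_stress_index : Int), Dom_move_stress word new_stress_index → Spec_move_stress word new_stress_index (move_stress word new_stress_index)

-- ===== LEMMAS AND PROOFS =====

theorem count_go_dash (l : List Char) : ∀ (fuel acc : Nat), l.length ≤ fuel →
    PySem.Chars.count.go ['-'] fuel l acc = acc + l.count '-' := by
  induction l with
  | nil => intro fuel acc _; cases fuel <;> simp [PySem.Chars.count.go]
  | cons c t ih =>
    intro fuel acc h
    cases fuel with
    | zero => simp at h
    | succ f =>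
      simp only [PySem.Chars.count.go, List.isPrefixOf]
      by_cases hc : ('-' : Char) == c
      · simp only [hc, Bool.and_self, if_pos, List.length_cons, List.drop_succ_cons,
          List.length_nil, List.drop_zero]
        rw [ih f (acc+1) (by simpa using h)]
        have hce : c = '-' := (beq_iff_eq.mp hc).symm
        simp [hce, List.count_cons]
        omega
      · rw [if_neg (by simpa using hc)]
        rw [ih f acc (by simpa using h)]
        have : ¬ c = '-' := fun e => hc (by simp [e])
        simp [List.count_cons, this]

theorem count_dash (l : List Char) : PySem.Chars.count l ['-'] = l.count '-' := by
  simp [PySem.Chars.count, count_go_dash l l.length 0 le_rfl]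

theorem replace_go_quote (l : List Char) : ∀ (fuel : Nat) (acc : List Char), l.length ≤ fuel →
    PySem.Chars.replace.go ['"'] [] fuel l acc = acc.reverse ++ l.filter (· != '"') := by
  induction l with
  | nil => intro fuel acc _; cases fuel <;> simp [PySem.Chars.replace.go]
  | cons c t ih =>
    intro fuel acc h
    cases fuel with
    | zero => simp at h
    | succ f =>
      simp only [PySem.Chars.replace.go, List.isPrefixOf]
      by_cases hc : ('"' : Char) == c
      · simp only [hc, Bool.and_self, if_pos, List.length_cons, List.drop_succ_cons,
          List.length_nil, List.drop_zero, List.reverse_nil, List.nil_append]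
        rw [ih f acc (by simpa using h)]
        have hce : c = '"' := (beq_iff_eq.mp hc).symm
        simp [hce, List.filter_cons]
      · rw [if_neg (by simpa using hc)]
        rw [ih f (c :: acc) (by simpa using h)]
        have : (c != '"') = true := by simp only [bne_iff_ne]; exact fun e => hc (by simp [e])
        simp [List.filter_cons, this]

theorem replace_quote (l : List Char) : PySem.Chars.replace l ['"'] [] = l.filter (· != '"') := by
  simp [PySem.Chars.replace, replace_go_quote l l.length [] le_rfl]
theorem splitOn_go_dash (l : List Char) : ∀ (fuel : Nat) (cur : List Char) (acc : List (List Char)),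
    l.length ≤ fuel →
    PySem.Chars.splitOn.go ['-'] fuel l cur acc
      = acc.reverse ++ (l.splitOn '-').modifyHead (cur.reverse ++ ·) := by
  induction l with
  | nil =>
    intro fuel cur acc _
    cases fuel <;> simp [PySem.Chars.splitOn.go, List.splitOn]
  | cons c t ih =>
    intro fuel cur acc h
    obtain ⟨p, ps, hps⟩ : ∃ p ps, t.splitOn '-' = p :: ps := by
      rcases e : t.splitOn '-' with _ | ⟨p, ps⟩
      · exact absurd e (List.splitOnP_ne_nil _ _)
      · exact ⟨p, ps, rfl⟩
    cases fuel with
    | zero => simp at h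
    | succ f =>
      simp only [PySem.Chars.splitOn.go, List.isPrefixOf]
      by_cases hc : ('-' : Char) == c
      · have hce : c = '-' := (beq_iff_eq.mp hc).symm
        simp only [hc, Bool.and_self, if_pos, List.length_cons, List.drop_succ_cons,
          List.length_nil, List.drop_zero]
        rw [ih f [] (cur.reverse :: acc) (by simpa using h)]
        simp [hce, List.splitOn, List.splitOnP_cons, hps, List.splitOn] at *
        simp [hps]
      · have hcne : ¬ c = '-' := fun e => hc (by simp [e])
        rw [if_neg (by simpa using hc)]
        rw [ih f (c :: cur) acc (by simp only [List.length_cons] at h; omega)]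
        simp only [List.splitOn, List.splitOnP_cons] at *
        rw [if_neg (by simpa using hcne)]
        simp [hps]

theorem splitOn_dash (l : List Char) : PySem.Chars.splitOn l ['-'] = l.splitOn '-' := by
  rw [PySem.Chars.splitOn, splitOn_go_dash l (l.length + 1) [] [] (by omega)]
  rcases e : l.splitOn '-' with _ | ⟨p, ps⟩
  · exact absurd e (List.splitOnP_ne_nil _ _)
  · simp

theorem length_splitOn_dash (l : List Char) : (l.splitOn '-').length = l.count '-' + 1 := by
  induction l with
  | nil => simp [List.splitOn]
  | cons c t ih =>
    simp only [List.splitOn, List.splitOnP_cons] at *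
    by_cases hc : c = '-'
    · simp [hc, List.count_cons, ih]
    · rw [if_neg (by simpa using hc)]
      simp [List.length_modifyHead, ih, List.count_cons, hc]
def pref (k i : Int) : List Char := if i == k then ['"'] else []

def partsOut (k : Int) : Int → List (List Char) → List Char
  | _, [] => []
  | i, [p] => pref k i ++ p.filter (· != '"')
  | i, p :: q :: rest => pref k i ++ p.filter (· != '"') ++ '-' :: partsOut k (i+1) (q :: rest)

def emit (k : Int) : List Char → Int → List Char
  | [], _ => []
  | c :: t, j =>
    if c = '"' then emit k t j
    else if c = '-' then c :: (pref k (j+1) ++ emit k t (j+1))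
    else c :: emit k t j

theorem join_eq_partsOut (k : Int) (sylls : List (List Char)) : ∀ (i : Int),
    PySem.Chars.join ['-'] ((PySem.List.enumerate sylls i).map (fun p =>
      (if p.1 == k then ['"'] else []) ++ PySem.Chars.replace p.2 ['"'] []))
      = partsOut k i sylls := by
  induction sylls with
  | nil => intro i; simp [PySem.List.enumerate_nil, PySem.Chars.join_nil, partsOut]
  | cons p rest ih =>
    intro i
    cases rest with
    | nil =>
      simp [PySem.List.enumerate_cons, PySem.List.enumerate_nil, PySem.Chars.join_singleton,
        partsOut, pref, replace_quote]
    | cons q rest' =>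
      simp only [PySem.List.enumerate_cons, List.map_cons, PySem.Chars.join_cons_cons,
        partsOut, replace_quote, pref]
      have ih' := ih (i+1)
      simp only [PySem.List.enumerate_cons, List.map_cons, replace_quote] at ih'
      rw [ih']
      simp

theorem partsOut_splitOn (k : Int) (l : List Char) : ∀ (pre : List Char) (j : Int),
    partsOut k j ((l.splitOn '-').modifyHead (pre ++ ·))
      = pref k j ++ pre.filter (· != '"') ++ emit k l j := by
  induction l with
  | nil => intro pre j; simp [List.splitOn, emit, partsOut]
  | cons c t ih =>
    intro pre j
    obtain ⟨p, ps, hps⟩ : ∃ p ps, t.splitOn '-' = p :: ps := by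
      rcases e : t.splitOn '-' with _ | ⟨p, ps⟩
      · exact absurd e (List.splitOnP_ne_nil _ _)
      · exact ⟨p, ps, rfl⟩
    by_cases hdash : c = '-'
    · have h1 : (c :: t).splitOn '-' = [] :: t.splitOn '-' := by
        simp [List.splitOn, List.splitOnP_cons, hdash]
      rw [h1, hps]
      have ih' := ih [] (j+1)
      rw [hps] at ih'
      simp only [List.modifyHead, List.nil_append] at ih' ⊢
      cases ps with
      | nil =>
        simp only [partsOut, List.append_nil] at ih' ⊢
        rw [ih']
        simp [emit, hdash]
      | cons r rs =>
        simp only [partsOut, List.append_nil] at ih' ⊢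
        rw [ih']
        simp [emit, hdash]
    · have h1 : (c :: t).splitOn '-' = (t.splitOn '-').modifyHead (c :: ·) := by
        simp only [List.splitOn, List.splitOnP_cons]
        rw [if_neg (by simpa using hdash)]
      rw [h1, hps]
      have ih' := ih (pre ++ [c]) j
      rw [hps] at ih'
      simp only [List.modifyHead] at ih' ⊢
      rw [show pre ++ c :: p = (pre ++ [c]) ++ p by simp]
      rw [ih']
      by_cases hq : c = '"'
      · simp [emit, hq, List.filter_append]
      · have : (c != '"') = true := by simp only [bne_iff_ne]; exact hq
        simp [emit, hq, hdash, List.filter_append, this]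

theorem foldl_emit (k : Int) (l : List Char) : ∀ (acc : List Char) (j : Int),
    l.foldl (fun (st : List Char × Int) c =>
      if c == '"' then st
      else
        let out := st.1 ++ [c]
        if c == '-' then
          let j := st.2 + 1
          (if j == k then out ++ ['"'] else out, j)
        else (out, st.2)) (acc, j)
      = (acc ++ emit k l j, j + (l.count '-' : Int)) := by
  induction l with
  | nil => intro acc j; simp [emit]
  | cons c t ih =>
    intro acc j
    simp only [List.foldl_cons]
    by_cases hq : c = '"'
    · rw [if_pos (by simp [hq])]
      rw [ih acc j]
      simp [emit, hq, List.count_cons]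
    · rw [if_neg (by simpa using hq)]
      by_cases hdash : c = '-'
      · rw [if_pos (by simp [hdash])]
        rw [ih _ (j+1)]
        by_cases hk : j + 1 = k
        · rw [if_pos (by simpa using hk)]
          simp [emit, hq, hdash, pref, hk, List.count_cons]
          omega
        · rw [if_neg (by simpa using hk)]
          have : ¬ (j + 1 == k) = true := by simpa using hk
          simp [emit, hq, hdash, pref, this, List.count_cons]
          omega
      · rw [if_neg (by simpa using hdash)]
        rw [ih _ j]
        simp [emit, hq, hdash, List.count_cons]

-- ===== VERDICT (by name: the statement is the Claim_ definition above) =====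
theorem move_stress_spec : Claim_equal_move_stress := by
  intro word k _hdom
  unfold Spec_move_stress move_stress move_stress_alt
  have hdl : ("-" : String).toList = ['-'] := rfl
  simp only [PySem.Str.count_eq, hdl, splitOn_dash, count_dash]
  set l := word.toList with hl
  have hlen : (l.splitOn '-').length = l.count '-' + 1 := length_splitOn_dash l
  by_cases h1 : l.count '-' = 0
  · rw [if_pos (by simp only [beq_iff_eq]; omega : ((l.splitOn '-').length == 1) = true),
        if_pos (by simp only [beq_iff_eq]; omega : (((l.count '-' : Int) + 1) == 1) = true)]
  · rw [if_neg (by simp only [beq_iff_eq]; omega :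
          ¬ ((l.splitOn '-').length == 1) = true),
        if_neg (by simp only [beq_iff_eq]; omega :
          ¬ (((l.count '-' : Int) + 1) == 1) = true)]
    have hlenZ : ((l.splitOn '-').length : Int) = (l.count '-' : Int) + 1 := by
      exact_mod_cast hlen
    by_cases h2 : k < 0 ∨ (l.count '-' : Int) + 1 ≤ k
    · rw [if_pos (by simp only [Bool.or_eq_true, decide_eq_true_eq, hlenZ]; exact h2),
          if_pos (by simp only [Bool.or_eq_true, decide_eq_true_eq]; exact h2)]
    · rw [if_neg (by simp only [Bool.or_eq_true, decide_eq_true_eq, hlenZ]; exact h2),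
          if_neg (by simp only [Bool.or_eq_true, decide_eq_true_eq]; exact h2)]
      rw [join_eq_partsOut k (l.splitOn '-') 0]
      have hsplit : (l.splitOn '-') = (l.splitOn '-').modifyHead (([] : List Char) ++ ·) := by
        rcases e : l.splitOn '-' with _ | ⟨p, ps⟩
        · exact absurd e (List.splitOnP_ne_nil _ _)
        · simp
      rw [hsplit, partsOut_splitOn k l [] 0]
      rw [foldl_emit k l (if (k == 0) = true then ['"'] else []) 0]
      have hpre : pref k 0 = (if (k == 0) = true then ['"'] else []) := by
        by_cases hk0 : k = 0
        · simp [pref, hk0]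
        · rw [pref, if_neg (by simpa using fun e => hk0 e.symm),
            if_neg (by simpa using hk0)]
      simp [hpre]
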